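-- pv_equiv track=rewrite | github.com/JuanCamiloQuicenoRico/Estructura-de-datos | tarea1.py | diferenciaListas
-- ===== SOURCE A (Python) =====
-- def diferenciaListas(listaA,listaB):
--     #se pone lista vacia para añadir los resultados
--     resultado = []
--     #rango para que recorra la lista A
--     for i in range (len(listaA)):
--         loEncontre = False
--         #rango para que recorra la lista B
--         for j in range (len(listaB)):
--             #compara si algún caracter de la lista A esta en la lista B
--             if listaB[j] == listaA[i]:
--                 listaB.pop(j)
--                 loEncontre = True
--                 #rompe el ciclo
--                 break
--         #si lo encontre sigue siendo falso lo que hara es añadir el resultao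
--         #a la lista A
--
--         if loEncontre == False:
--             resultado.append(listaA[i])
--             #retornamos el resultado luego de haberlo añadido
--     return resultado
-- ===== SOURCE B (Python) =====
-- def diferenciaListas(listaA, listaB):
--     # Counter-based multiset difference: O(len(A)+len(B)).
--     # Note: unlike the original, this does NOT mutate listaB; return value is identical.
--     counts = {}
--     for x in listaB:
--         counts[x] = counts.get(x, 0) + 1
--     resultado = []
--     for x in listaA:
--         c = counts.get(x, 0)
--         if c != 0:
--             counts[x] = c - 1
--         else:
--             resultado.append(x)
--     return resultado
-- ===== Notes on version B (the rewrite author's own statement) =====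
-- stated objective: faster
-- what changed: Replaced the inner linear scan+pop over listaB for every element of listaA with a count dictionary of listaB built once and decremented per match, removing the inner scan.
import Mathlib
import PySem

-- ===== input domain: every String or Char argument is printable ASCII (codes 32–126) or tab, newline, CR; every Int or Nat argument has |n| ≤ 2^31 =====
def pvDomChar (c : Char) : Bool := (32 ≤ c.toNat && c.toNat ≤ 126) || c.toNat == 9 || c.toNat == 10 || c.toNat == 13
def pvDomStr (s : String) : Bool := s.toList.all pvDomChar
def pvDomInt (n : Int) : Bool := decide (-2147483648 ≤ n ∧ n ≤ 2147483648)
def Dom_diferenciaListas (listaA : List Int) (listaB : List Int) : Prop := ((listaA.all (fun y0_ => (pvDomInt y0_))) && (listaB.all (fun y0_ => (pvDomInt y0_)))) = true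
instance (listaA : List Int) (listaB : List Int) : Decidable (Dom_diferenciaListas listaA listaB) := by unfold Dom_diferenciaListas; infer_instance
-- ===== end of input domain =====

-- B replaces A's per-element inner scan+pop over listaB with a count dictionary built once
-- (objective: faster). A mutates listaB in place (pops matched elements); B does not —
-- the equivalence proved here is about the RETURN value only.


-- ===== PORT A =====
-- outer loop over listaA; the inner 'for j … if listaB[j]==a: listaB.pop(j); break'
-- removes the first occurrence of a from the remaining listaB = PySem.List.remove?
def aLoop (xs : List Int) (B : List Int) (res : List Int) : List Int :=
  match xs with
  | [] => res
  | a :: rest =>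
    match PySem.List.remove? B a with
    | some B' => aLoop rest B' res
    | none => aLoop rest B (res ++ [a])

def diferenciaListas (listaA : List Int) (listaB : List Int) : List Int :=
  aLoop listaA listaB []

-- ===== PORT B =====
-- counts[x] = counts.get(x, 0) + 1 over listaB, then one pass over listaA
def bLoop (xs : List Int) (counts : PySem.Dict Int Int) (res : List Int) : List Int :=
  match xs with
  | [] => res
  | x :: rest =>
    let c := counts.getD x 0
    if c ≠ 0 then bLoop rest (counts.insert x (c - 1)) res
    else bLoop rest counts (res ++ [x])

def diferenciaListas_alt (listaA : List Int) (listaB : List Int) : List Int :=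
  bLoop listaA (listaB.foldl (fun d x => d.insert x (d.getD x 0 + 1)) PySem.Dict.empty) []

-- ===== PRECONDITION & SPEC =====
def Spec_diferenciaListas (listaA : List Int) (listaB : List Int) (out : List Int) : Prop := out = diferenciaListas_alt listaA listaB
instance (listaA : List Int) (listaB : List Int) (out : List Int) : Decidable (Spec_diferenciaListas listaA listaB out) := by unfold Spec_diferenciaListas; infer_instance

-- ===== CLAIM (what is proved, stated in full; the proofs are below) =====
def Claim_equal_diferenciaListas : Prop := ∀ (listaA : List Int) (listaB : List Int), Dom_diferenciaListas listaA listaB → Spec_diferenciaListas listaA listaB (diferenciaListas listaA listaB)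

-- ===== LEMMAS AND PROOFS =====

-- invariant: the dict holds exactly the multiplicities of the remaining listaB
lemma loop_eq (xs : List Int) (B : List Int) (counts : PySem.Dict Int Int) (res : List Int)
    (h : ∀ x, counts.getD x 0 = (B.count x : Int)) :
    aLoop xs B res = bLoop xs counts res := by
  induction xs generalizing B counts res with
  | nil => rfl
  | cons a rest ih =>
    simp only [aLoop, bLoop]
    by_cases hmem : a ∈ B
    · have hc : counts.getD a 0 ≠ 0 := by
        rw [h a]
        have := List.count_pos_iff.mpr hmem
        omega
      rw [PySem.List.remove?_eq_some_erase B a hmem]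
      simp only [hc, if_pos, ne_eq, not_false_eq_true]
      apply ih
      intro x
      rw [PySem.Dict.getD_insert]
      by_cases hx : x = a
      · subst hx
        rw [if_pos rfl, h x, List.count_erase_self]
        have := List.count_pos_iff.mpr hmem
        omega
      · rw [if_neg hx, h x, List.count_erase_of_ne hx]
    · have hc : counts.getD a 0 = 0 := by
        rw [h a, List.count_eq_zero_of_not_mem hmem]; rfl
      rw [(PySem.List.remove?_eq_none_iff B a).mpr hmem]
      simp only [hc, ne_eq, not_true_eq_false, if_false]
      exact ih _ _ _ h

-- ===== VERDICT (by name: the statement is the Claim_ definition above) =====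
theorem diferenciaListas_spec : Claim_equal_diferenciaListas := by
  intro listaA listaB _
  unfold Spec_diferenciaListas diferenciaListas diferenciaListas_alt
  apply loop_eq
  intro x
  rw [PySem.Dict.getD_foldl_insert_add_one]
  simp [PySem.Dict.getD_empty]
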